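-- pv_equiv track=rewrite | github.com/sanmasanba/atcoder_codes | ABC/200/277/ABC277_C.py | search
-- ===== SOURCE A (Python) =====
-- def search(G, visited, res):
--     visited[res] = 1
--     tofloor = res
--     for i in G[res]:
--         if visited[i] == 1:
--             continue
--         else:
--             tofloor = max([tofloor, search(G, visited, i)])
--     return tofloor
-- ===== SOURCE B (Python) =====
-- # Iterative DFS with an explicit stack of neighbor iterators instead of recursion;
-- # same in-place marking of `visited` (same nodes set to 1), same returned maximum.
-- def search(G, visited, res):
--     visited[res] = 1
--     best = res
--     stack = [iter(G[res])]
--     while stack: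
--         i = next(stack[-1], None)
--         if i is None:
--             stack.pop()
--         elif visited[i] != 1:
--             visited[i] = 1
--             best = max(best, i)
--             stack.append(iter(G[i]))
--     return best
-- ===== Notes on version B (the rewrite author's own statement) =====
-- stated objective: alternative
-- what changed: The recursive DFS is replaced by an iterative DFS driven by an explicit stack of neighbor iterators with a single global running maximum, instead of per-call recursion combining child results with max.
import Mathlib
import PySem

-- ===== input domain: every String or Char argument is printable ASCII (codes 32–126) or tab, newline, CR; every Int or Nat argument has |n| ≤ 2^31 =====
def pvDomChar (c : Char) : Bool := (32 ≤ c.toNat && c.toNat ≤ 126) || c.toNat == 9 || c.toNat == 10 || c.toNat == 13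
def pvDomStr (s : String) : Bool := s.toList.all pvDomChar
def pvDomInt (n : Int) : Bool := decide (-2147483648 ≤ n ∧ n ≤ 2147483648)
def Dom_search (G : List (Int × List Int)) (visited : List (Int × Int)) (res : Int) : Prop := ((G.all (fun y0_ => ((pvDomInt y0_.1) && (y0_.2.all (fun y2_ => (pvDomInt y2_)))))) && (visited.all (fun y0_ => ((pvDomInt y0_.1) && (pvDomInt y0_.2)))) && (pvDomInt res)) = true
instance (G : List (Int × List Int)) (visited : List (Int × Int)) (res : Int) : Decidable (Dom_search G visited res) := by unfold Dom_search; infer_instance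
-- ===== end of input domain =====

-- B replaces A's recursion by an explicit iterator stack with one global maximum; both mark the
-- same nodes of `visited` in place (the equivalence proved is about the returned value).

-- ===== PORT A =====
-- recursive DFS; the for-loop over G[res] is the mutual helper loopA threading (tofloor, visited).
-- The Nat fuel only makes the recursion total; under Pre_search it never runs out (visited.length+2 bounds the call depth).
mutual
def goA (G : PySem.Dict Int (List Int)) : Nat → PySem.Dict Int Int → Int → Int × PySem.Dict Int Int
  | 0, vis, res => (res, vis)  -- fuel exhausted: unreachable under Pre_search
  | fa + 1, vis, res => loopA G fa (vis.insert res 1) (G.getD res []) res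
  termination_by fa _ _ => (fa, 0)
def loopA (G : PySem.Dict Int (List Int)) (fa : Nat) (vis : PySem.Dict Int Int) :
    List Int → Int → Int × PySem.Dict Int Int
  | [], tofloor => (tofloor, vis)
  | i :: rest, tofloor =>
      if vis.getD i 0 == 1 then loopA G fa vis rest tofloor
      else
        let p := goA G fa vis i
        loopA G fa p.2 rest (max tofloor p.1)
  termination_by ns _ => (fa, ns.length + 1)
end

def search (G : List (Int × List Int)) (visited : List (Int × Int)) (res : Int) : Int :=
  (goA (PySem.Dict.mk G) (visited.length + 2) (PySem.Dict.mk visited) res).1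

-- ===== PORT B =====
-- iterative DFS: the stack holds the not-yet-consumed remainder of each pushed iterator iter(G[node]);
-- fuel is consumed only when a node is marked (each mark pops one unmarked entry of visited under Pre_search).
def goB (G : PySem.Dict Int (List Int)) : Nat → List (List Int) → PySem.Dict Int Int → Int → Int
  | _, [], _, best => best
  | fb, [] :: frames, vis, best => goB G fb frames vis best          -- iterator exhausted: stack.pop()
  | fb, (i :: rest) :: frames, vis, best =>
      if vis.getD i 0 == 1 then goB G fb (rest :: frames) vis best
      else
        match fb with
        | 0 => best  -- fuel exhausted: unreachable under Pre_search
        | fb + 1 =>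
            goB G fb (G.getD i [] :: rest :: frames) (vis.insert i 1) (max best i)
termination_by fb stack _ _ => (fb, (stack.map List.length).sum + stack.length)
decreasing_by all_goals simp_all; omega

def search_alt (G : List (Int × List Int)) (visited : List (Int × Int)) (res : Int) : Int :=
  goB (PySem.Dict.mk G) (visited.length + 2) [(PySem.Dict.mk G).getD res []]
    ((PySem.Dict.mk visited).insert res 1) res

-- ===== PRECONDITION & SPEC =====
-- Pre_search excludes exactly the inputs on which A raises KeyError: it requires G[u] and the
-- visited[v] of every neighbor v to exist for precisely the nodes u the DFS expands, i.e. the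
-- closure reachE of res under edges into initially-unvisited keys (a graph-shape condition on
-- the input; it does not run A's traversal, marking or max computation).
def expandableB (visited : List (Int × Int)) (res v : Int) : Bool :=
  !(v == res) &&
    (match (PySem.Dict.mk visited).get? v with
     | some w => !(w == 1)
     | none => false)

def stepE (G : List (Int × List Int)) (visited : List (Int × Int)) (res : Int)
    (S : List Int) : List Int :=
  S ++ ((S.flatMap (fun u => (PySem.Dict.mk G).getD u [])).filter
        (fun v => !(S.contains v) && expandableB visited res v))

def reachE (G : List (Int × List Int)) (visited : List (Int × Int)) (res : Int) : List Int :=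
  (stepE G visited res)^[visited.length + 1] [res]

def Pre_search (G : List (Int × List Int)) (visited : List (Int × Int)) (res : Int) : Prop :=
  (PySem.Dict.mk G).contains res = true ∧
  ∀ u ∈ reachE G visited res, (PySem.Dict.mk G).contains u = true ∧
    ∀ v ∈ (PySem.Dict.mk G).getD u [], v = res ∨ (PySem.Dict.mk visited).contains v = true
instance (G : List (Int × List Int)) (visited : List (Int × Int)) (res : Int) : Decidable (Pre_search G visited res) := by unfold Pre_search; infer_instance

def pvWitness_search : (List (Int × List Int)) × (List (Int × Int)) × Int :=
  ([(0, [1, 2]), (1, [0]), (2, [])], [(0, 0), (1, 0), (2, 0)], 0)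

def Spec_search (G : List (Int × List Int)) (visited : List (Int × Int)) (res : Int) (out : Int) : Prop := out = search_alt G visited res
instance (G : List (Int × List Int)) (visited : List (Int × Int)) (res : Int) (out : Int) : Decidable (Spec_search G visited res out) := by unfold Spec_search; infer_instance

-- ===== CLAIM (what is proved, stated in full; the proofs are below) =====
def Claim_equal_search : Prop := ∀ (G : List (Int × List Int)) (visited : List (Int × Int)) (res : Int), Dom_search G visited res → Pre_search G visited res → Spec_search G visited res (search G visited res)

-- ===== LEMMAS AND PROOFS =====

-- number of not-yet-marked entries of visited: the fuel measure of both ports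
def Mu (vis : PySem.Dict Int Int) : Nat := (vis.items.filter (fun p => !(p.2 == 1))).length

theorem countP_lt_of_witness {A : Type} (p q : A → Bool) (l : List A) (a : A)
    (ha : a ∈ l) (hpa : p a = true) (hqa : q a = false)
    (h : ∀ x ∈ l, q x = true → p x = true) : l.countP q < l.countP p := by
  induction l with
  | nil => cases ha
  | cons b t ih =>
    rcases List.mem_cons.mp ha with rfl | hat
    · have hle : t.countP q ≤ t.countP p :=
        List.countP_mono_left (fun x hx hq => h x (List.mem_cons_of_mem _ hx) hq)
      simp [hpa, hqa]; omega
    · have hlt : t.countP q < t.countP p :=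
        ih hat (fun x hx hq => h x (List.mem_cons_of_mem _ hx) hq)
      have hb : q b = true → p b = true := h b (List.mem_cons_self ..)
      by_cases hqb : q b = true
      · simp [hqb, hb hqb]; omega
      · simp at hqb
        simp [List.countP_cons, hqb]; omega

theorem Mu_le_length (vis : PySem.Dict Int Int) : Mu vis ≤ vis.items.length := by
  unfold Mu; exact List.length_filter_le _ _

theorem Mu_insert_le (vis : PySem.Dict Int Int) (i : Int) : Mu (vis.insert i 1) ≤ Mu vis := by
  unfold Mu
  rw [PySem.Dict.items_insert]
  by_cases hc : vis.contains i = true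
  · simp only [hc, if_true]
    rw [← List.countP_eq_length_filter, ← List.countP_eq_length_filter, List.countP_map]
    refine List.countP_mono_left (fun x _ hx => ?_)
    simp only [Function.comp] at hx
    by_cases hxi : x.1 == i
    · simp [hxi] at hx
    · simpa [hxi] using hx
  · simp only [hc]
    simp [List.filter_append]

theorem Mu_insert_lt (vis : PySem.Dict Int Int) (i : Int)
    (hc : vis.contains i = true) (hne : vis.getD i 0 ≠ 1) : Mu (vis.insert i 1) < Mu vis := by
  have hs : (vis.get? i).isSome := by rw [← PySem.Dict.contains_eq_isSome_get?]; exact hc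
  obtain ⟨v, hv⟩ := Option.isSome_iff_exists.mp hs
  have hvne : v ≠ 1 := by
    have := PySem.Dict.getD_of_get?_eq_some vis 0 hv
    omega
  have hmem : (i, v) ∈ vis.items := PySem.Dict.mem_items_of_get?_eq_some vis hv
  unfold Mu
  rw [PySem.Dict.items_insert]
  simp only [hc, if_true]
  rw [← List.countP_eq_length_filter, ← List.countP_eq_length_filter, List.countP_map]
  refine countP_lt_of_witness _ _ _ (i, v) hmem (by simpa using hvne) (by simp [Function.comp])
    (fun x _ hx => ?_)
  simp only [Function.comp] at hx
  by_cases hxi : x.1 == i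
  · simp [hxi] at hx
  · simpa [hxi] using hx

theorem Mu_pos (vis : PySem.Dict Int Int) (i : Int)
    (hc : vis.contains i = true) (hne : vis.getD i 0 ≠ 1) : 1 ≤ Mu vis := by
  have hs : (vis.get? i).isSome := by rw [← PySem.Dict.contains_eq_isSome_get?]; exact hc
  obtain ⟨v, hv⟩ := Option.isSome_iff_exists.mp hs
  have hvne : v ≠ 1 := by
    have := PySem.Dict.getD_of_get?_eq_some vis 0 hv
    omega
  have hmem : (i, v) ∈ vis.items := PySem.Dict.mem_items_of_get?_eq_some vis hv
  have : (i, v) ∈ vis.items.filter (fun p => !(p.2 == 1)) :=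
    List.mem_filter.mpr ⟨hmem, by simpa using hvne⟩
  unfold Mu
  exact List.length_pos_of_mem this

-- monotone facts about A's run: marks are preserved, keys are preserved, Mu does not grow, result ≥ seed
def MonoA (vis v' : PySem.Dict Int Int) : Prop :=
  (∀ k, vis.getD k 0 = 1 → v'.getD k 0 = 1) ∧
  (∀ k, vis.contains k = true → v'.contains k = true) ∧ Mu v' ≤ Mu vis

theorem MonoA_refl (vis : PySem.Dict Int Int) : MonoA vis vis :=
  ⟨fun _ h => h, fun _ h => h, le_refl _⟩

theorem MonoA_trans {a b c : PySem.Dict Int Int} (h1 : MonoA a b) (h2 : MonoA b c) : MonoA a c :=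
  ⟨fun k h => h2.1 k (h1.1 k h), fun k h => h2.2.1 k (h1.2.1 k h), le_trans h2.2.2 h1.2.2⟩

theorem MonoA_insert (vis : PySem.Dict Int Int) (i : Int) : MonoA vis (vis.insert i 1) := by
  refine ⟨fun k h => ?_, fun k h => ?_, Mu_insert_le vis i⟩
  · rw [PySem.Dict.getD_insert]
    split <;> simp [h]
  · rw [PySem.Dict.contains_insert]
    simp [h]

theorem mono_goA (G : PySem.Dict Int (List Int)) : ∀ fa,
    (∀ vis res, MonoA vis (goA G fa vis res).2 ∧ res ≤ (goA G fa vis res).1) ∧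
    (∀ ns vis tofloor, MonoA vis (loopA G fa vis ns tofloor).2 ∧ tofloor ≤ (loopA G fa vis ns tofloor).1) := by
  intro fa
  induction fa with
  | zero =>
    have hg : ∀ vis res, MonoA vis (goA G 0 vis res).2 ∧ res ≤ (goA G 0 vis res).1 := by
      intro vis res; simp [goA]; exact MonoA_refl vis
    refine ⟨hg, ?_⟩
    intro ns
    induction ns with
    | nil => intro vis tofloor; simp [loopA]; exact MonoA_refl vis
    | cons i rest ih =>
      intro vis tofloor
      by_cases h1 : vis.getD i 0 == 1
      · simpa [loopA, h1] using ih vis tofloor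
      · simp only [loopA, h1, Bool.false_eq_true, if_false]
        obtain ⟨hm, hle⟩ := ih (goA G 0 vis i).2 (max tofloor (goA G 0 vis i).1)
        exact ⟨MonoA_trans (hg vis i).1 hm, le_trans (le_max_left _ _) hle⟩
  | succ f' ihf =>
    have hg : ∀ vis res, MonoA vis (goA G (f' + 1) vis res).2 ∧ res ≤ (goA G (f' + 1) vis res).1 := by
      intro vis res
      simp only [goA]
      obtain ⟨hm, hle⟩ := ihf.2 (G.getD res []) (vis.insert res 1) res
      exact ⟨MonoA_trans (MonoA_insert vis res) hm, hle⟩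
    refine ⟨hg, ?_⟩
    intro ns
    induction ns with
    | nil => intro vis tofloor; simp [loopA]; exact MonoA_refl vis
    | cons i rest ih =>
      intro vis tofloor
      by_cases h1 : vis.getD i 0 == 1
      · simpa [loopA, h1] using ih vis tofloor
      · simp only [loopA, h1, Bool.false_eq_true, if_false]
        obtain ⟨hm, hle⟩ := ih (goA G (f' + 1) vis i).2 (max tofloor (goA G (f' + 1) vis i).1)
        exact ⟨MonoA_trans (hg vis i).1 hm, le_trans (le_max_left _ _) hle⟩

-- reachE basics: one step stays inside, iterates are monotone in the count, a step adds expandable neighbors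
theorem subset_stepE (G : List (Int × List Int)) (visited : List (Int × Int)) (res : Int)
    (S : List Int) : ∀ x ∈ S, x ∈ stepE G visited res S := by
  intro x hx; exact List.mem_append_left _ hx

theorem iter_mono (G : List (Int × List Int)) (visited : List (Int × Int)) (res : Int) :
    ∀ (a b : Nat), a ≤ b → ∀ x ∈ (stepE G visited res)^[a] [res], x ∈ (stepE G visited res)^[b] [res] := by
  intro a b hab
  obtain ⟨j, rfl⟩ : ∃ j, b = a + j := ⟨b - a, by omega⟩
  induction j with
  | zero => intro x hx; exact hx
  | succ j ihj =>
    intro x hx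
    rw [show a + (j + 1) = (a + j) + 1 from rfl, Function.iterate_succ_apply']
    exact subset_stepE G visited res _ _ (ihj (by omega) x hx)

theorem mem_stepE_next (G : List (Int × List Int)) (visited : List (Int × Int)) (res : Int)
    (k : Nat) (u v : Int) (hu : u ∈ (stepE G visited res)^[k] [res])
    (hv : v ∈ (PySem.Dict.mk G).getD u []) (he : expandableB visited res v = true) :
    v ∈ (stepE G visited res)^[k + 1] [res] := by
  rw [Function.iterate_succ_apply']
  by_cases hin : ((stepE G visited res)^[k] [res]).contains v
  · exact List.mem_append_left _ (by simpa using hin)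
  · refine List.mem_append_right _ (List.mem_filter.mpr ⟨?_, ?_⟩)
    · exact List.mem_flatMap.mpr ⟨u, hu, hv⟩
    · simp only [hin, he]; rfl

-- the bisimulation: running B on a stack whose top frame is ns equals running A's loop on ns
-- (same final visited, best absorbing the loop's tofloor), then B on the remaining frames
theorem main (G0 : List (Int × List Int)) (visited0 : List (Int × Int)) (res0 : Int)
    (hPre : ∀ u ∈ reachE G0 visited0 res0, (PySem.Dict.mk G0).contains u = true ∧
      ∀ v ∈ (PySem.Dict.mk G0).getD u [], v = res0 ∨ (PySem.Dict.mk visited0).contains v = true) :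
    ∀ (fa : Nat) (ns : List Int)
    (vis : PySem.Dict Int Int) (tofloor : Int) (frames : List (List Int)) (best : Int) (fb k : Nat) (u : Int),
    (∀ j, (PySem.Dict.mk visited0).getD j 0 = 1 → vis.getD j 0 = 1) →
    (∀ j, (PySem.Dict.mk visited0).contains j = true → vis.contains j = true) →
    vis.getD res0 0 = 1 →
    u ∈ (stepE G0 visited0 res0)^[k] [res0] →
    (∀ i ∈ ns, i ∈ (PySem.Dict.mk G0).getD u []) →
    k + Mu vis ≤ visited0.length →
    Mu vis < fa → Mu vis < fb → tofloor ≤ best →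
    ∃ fb', Mu (loopA (PySem.Dict.mk G0) fa vis ns tofloor).2 < fb' ∧
      goB (PySem.Dict.mk G0) fb (ns :: frames) vis best
        = goB (PySem.Dict.mk G0) fb' frames (loopA (PySem.Dict.mk G0) fa vis ns tofloor).2
            (max best (loopA (PySem.Dict.mk G0) fa vis ns tofloor).1) := by
  intro fa
  induction fa with
  | zero => intro ns vis tofloor frames best fb k u _ _ _ _ _ _ h3 _ _; omega
  | succ f' ihf =>
    intro ns
    induction ns with
    | nil =>
      intro vis tofloor frames best fb k u hm hk hr hu hns hbud hfa hfb htb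
      refine ⟨fb, by simpa [loopA] using hfb, ?_⟩
      simp [loopA, goB, max_eq_left htb]
    | cons i rest ih =>
      intro vis tofloor frames best fb k u hm hk hr hu hns hbud hfa hfb htb
      by_cases h1 : vis.getD i 0 == 1
      · have e1 : loopA (PySem.Dict.mk G0) (f' + 1) vis (i :: rest) tofloor
            = loopA (PySem.Dict.mk G0) (f' + 1) vis rest tofloor := by
          simp [loopA, h1]
        have e2 : goB (PySem.Dict.mk G0) fb ((i :: rest) :: frames) vis best
            = goB (PySem.Dict.mk G0) fb (rest :: frames) vis best := by
          rw [goB.eq_def]; simp [h1]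
        rw [e1, e2]
        exact ih vis tofloor frames best fb k u hm hk hr hu
          (fun j hj => hns j (List.mem_cons_of_mem _ hj)) hbud hfa hfb htb
      · have hne : vis.getD i 0 ≠ 1 := by simpa using h1
        -- i is an unvisited key the DFS expands: collect its Pre_ facts
        have hires : i ≠ res0 := fun h => hne (h ▸ hr)
        have huE : u ∈ reachE G0 visited0 res0 :=
          iter_mono G0 visited0 res0 k (visited0.length + 1) (by omega) u hu
        have hiv0 : (PySem.Dict.mk visited0).contains i = true := by
          rcases (hPre u huE).2 i (hns i (List.mem_cons_self ..)) with h | h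
          · exact absurd h hires
          · exact h
        have hs0 : ((PySem.Dict.mk visited0).get? i).isSome := by
          rw [← PySem.Dict.contains_eq_isSome_get?]; exact hiv0
        obtain ⟨w, hw⟩ := Option.isSome_iff_exists.mp hs0
        have hwne : w ≠ 1 := by
          intro h
          exact hne (hm i (by rw [PySem.Dict.getD_of_get?_eq_some _ 0 hw, h]))
        have hexp : expandableB visited0 res0 i = true := by
          simp [expandableB, hires, hw, hwne]
        have hiE : i ∈ reachE G0 visited0 res0 :=
          iter_mono G0 visited0 res0 (k + 1) (visited0.length + 1) (by omega) i
            (mem_stepE_next G0 visited0 res0 k u i hu (hns i (List.mem_cons_self ..)) hexp)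
        have hGi : (PySem.Dict.mk G0).contains i = true := (hPre i hiE).1
        have hvisi : vis.contains i = true := hk i hiv0
        have hmu1 : 1 ≤ Mu vis := Mu_pos vis i hvisi hne
        obtain ⟨fb1, rfl⟩ : ∃ fb1, fb = fb1 + 1 := ⟨fb - 1, by omega⟩
        have hgs : ((PySem.Dict.mk G0).get? i).isSome := by
          rw [← PySem.Dict.contains_eq_isSome_get?]; exact hGi
        obtain ⟨adj, hadj⟩ := Option.isSome_iff_exists.mp hgs
        have hadjD : (PySem.Dict.mk G0).getD i [] = adj :=
          PySem.Dict.getD_of_get?_eq_some _ [] hadj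
        have hMuLt : Mu (vis.insert i 1) < Mu vis := Mu_insert_lt vis i hvisi hne
        have hkeep := (MonoA_insert vis i).2.1
        have hmrk := (MonoA_insert vis i).1
        obtain ⟨fb2, hfb2, heq2⟩ := ihf adj (vis.insert i 1) i (rest :: frames) (max best i) fb1
          (k + 1) i
          (fun j hj => hmrk j (hm j hj)) (fun j hj => hkeep j (hk j hj)) (hmrk res0 hr)
          (mem_stepE_next G0 visited0 res0 k u i hu (hns i (List.mem_cons_self ..)) hexp)
          (fun j hj => by rwa [hadjD])
          (by omega) (by omega) (by omega) (le_max_right _ _)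
        have hmono := (mono_goA (PySem.Dict.mk G0) f').2 adj (vis.insert i 1) i
        set p := loopA (PySem.Dict.mk G0) f' (vis.insert i 1) adj i with hp
        have eA : loopA (PySem.Dict.mk G0) (f' + 1) vis (i :: rest) tofloor
            = loopA (PySem.Dict.mk G0) (f' + 1) p.2 rest (max tofloor p.1) := by
          simp [loopA, h1, goA, hadjD, hp]
        have eB : goB (PySem.Dict.mk G0) (fb1 + 1) ((i :: rest) :: frames) vis best
            = goB (PySem.Dict.mk G0) fb1 (adj :: rest :: frames) (vis.insert i 1) (max best i) := by
          rw [goB.eq_def]; simp [h1, hadjD]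
        obtain ⟨fb3, hfb3, heq3⟩ := ih p.2 (max tofloor p.1) frames (max (max best i) p.1) fb2 k u
          (fun j hj => hmono.1.1 j (hmrk j (hm j hj)))
          (fun j hj => hmono.1.2.1 j (hkeep j (hk j hj)))
          (hmono.1.1 res0 (hmrk res0 hr))
          hu (fun j hj => hns j (List.mem_cons_of_mem _ hj))
          (by have := hmono.1.2.2; omega)
          (by have := hmono.1.2.2; omega) hfb2
          (max_le_max (le_trans htb (le_max_left _ _)) (le_refl _))
        refine ⟨fb3, by rw [eA]; exact hfb3, ?_⟩
        rw [eA, eB, heq2, heq3]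
        have hip : i ≤ p.1 := hmono.2
        have hpt : max tofloor p.1 ≤ (loopA (PySem.Dict.mk G0) (f' + 1) p.2 rest (max tofloor p.1)).1 :=
          ((mono_goA (PySem.Dict.mk G0) (f' + 1)).2 rest p.2 (max tofloor p.1)).2
        congr 1
        omega

-- ===== VERDICT (by name: the statement is the Claim_ definition above) =====
theorem search_spec : Claim_equal_search := by
  unfold Claim_equal_search
  intro G visited res _ hpre
  unfold Spec_search search search_alt
  obtain ⟨hres, hall⟩ := hpre
  have hgs : ((PySem.Dict.mk G).get? res).isSome := by
    rw [← PySem.Dict.contains_eq_isSome_get?]; exact hres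
  obtain ⟨adj, hadj⟩ := Option.isSome_iff_exists.mp hgs
  have hadjD : (PySem.Dict.mk G).getD res [] = adj :=
    PySem.Dict.getD_of_get?_eq_some (PySem.Dict.mk G) [] hadj
  have hMu : Mu ((PySem.Dict.mk visited).insert res 1) ≤ visited.length :=
    le_trans (Mu_insert_le _ res) (Mu_le_length (PySem.Dict.mk visited))
  obtain ⟨fb', _, heq⟩ := main G visited res hall (visited.length + 1) adj
    ((PySem.Dict.mk visited).insert res 1) res [] res (visited.length + 2) 0 res
    (fun j hj => (MonoA_insert (PySem.Dict.mk visited) res).1 j hj)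
    (fun j hj => (MonoA_insert (PySem.Dict.mk visited) res).2.1 j hj)
    (by rw [PySem.Dict.getD_insert]; simp)
    (List.mem_singleton.mpr rfl)
    (fun j hj => by rwa [hadjD])
    (by omega) (by omega) (by omega) (le_refl res)
  have eA : goA (PySem.Dict.mk G) (visited.length + 2) (PySem.Dict.mk visited) res
      = loopA (PySem.Dict.mk G) (visited.length + 1)
          ((PySem.Dict.mk visited).insert res 1) adj res := by
    rw [show visited.length + 2 = (visited.length + 1) + 1 from rfl]
    simp [goA, hadjD]
  rw [eA, hadjD, heq]
  have hres_le := ((mono_goA (PySem.Dict.mk G) (visited.length + 1)).2 adj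
    ((PySem.Dict.mk visited).insert res 1) res).2
  rw [goB.eq_def]
  simp only []
  omega
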